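-- pv_equiv track=rewrite | github.com/huangyingw/submissions | 1714/1714.sum-of-special-evenly-spaced-elements-in-array.987203631.Time-Limit-Exceeded.leetcode.python3.py | solve
-- ===== SOURCE A (Python) =====
-- def solve(nums, queries):
--     MOD = 10**9 + 7
--     n = len(nums)
--     sums = {}
--     result = []
--     for xi, yi in queries:
--         if (xi, yi) not in sums:
--             j = xi
--             total = 0
--             while j < n:
--                 total += nums[j]
--                 j += yi
--             sums[(xi, yi)] = total % MOD
--         result.append(sums[(xi, yi)])
--     return result
-- ===== SOURCE B (Python) =====
-- def solve(nums, queries):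
--     MOD = 10 ** 9 + 7
--     n = len(nums)
--     # threshold t = floor(sqrt(n))
--     t = 0
--     while (t + 1) * (t + 1) <= n:
--         t += 1
--     # rows[y-1][x] = nums[x] + nums[x+y] + ... (suffix DP, built back-to-front)
--     rows = []
--     for y in range(1, t + 1):
--         row = [0] * n
--         for x in range(n - 1, -1, -1):
--             row[x] = nums[x] + (row[x + y] if x + y < n else 0)
--         rows.append(row)
--
--     def answer(x, y):
--         if 1 <= y <= t and 0 <= x < n:
--             return rows[y - 1][x] % MOD
--         return sum(nums[x::y]) % MOD
--
--     return [answer(x, y) for x, y in queries]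
-- ===== Notes on version B (the rewrite author's own statement) =====
-- stated objective: alternative
-- what changed: Replaces A's per-query while-loop summation with memo dict by sqrt decomposition: a precomputed suffix DP table rows[y-1][x] answers queries with step y <= sqrt(n) by one lookup, larger steps are summed directly from the slice nums[x::y].
-- outside the precondition, e.g. on solve([1, 2, 3], [(-3, 1)]): A returns [12], B returns [6]; on solve([1], [(5, 0)]): A returns [0], B raises ValueError; on solve([1], [(5, -1)]): A returns [0], B returns [1]
import Mathlib
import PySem

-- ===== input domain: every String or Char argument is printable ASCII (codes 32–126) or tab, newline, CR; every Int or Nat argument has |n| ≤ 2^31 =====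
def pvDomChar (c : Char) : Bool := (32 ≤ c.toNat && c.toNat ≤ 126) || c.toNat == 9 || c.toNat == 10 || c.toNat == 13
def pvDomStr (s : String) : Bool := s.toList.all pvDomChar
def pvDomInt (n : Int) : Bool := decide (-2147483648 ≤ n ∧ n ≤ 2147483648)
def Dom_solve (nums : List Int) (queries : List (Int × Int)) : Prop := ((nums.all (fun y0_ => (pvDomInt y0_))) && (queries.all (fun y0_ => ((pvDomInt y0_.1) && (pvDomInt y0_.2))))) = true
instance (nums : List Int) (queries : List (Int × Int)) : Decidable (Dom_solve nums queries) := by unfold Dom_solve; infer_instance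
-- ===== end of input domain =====

-- B replaces A's per-query summation loop (memoised in a dict) by sqrt decomposition:
-- a precomputed suffix-DP table answers small-step queries, large steps are summed from a slice.

-- ===== PORT A =====
-- the inner 'while j < n: total += nums[j]; j += yi' loop; the fuel only bounds the
-- iteration count (nums.length + 1 suffices on the admitted inputs: xi ≥ 0, yi ≥ 1)
def solveWhile (nums : List Int) (n y : Int) : Nat → Int → Int → Int
  | 0, _, total => total
  | fuel+1, j, total =>
    if j < n then solveWhile nums n y fuel (j + y) (total + PySem.List.pyGetD nums j 0)
    else total

def solve (nums : List Int) (queries : List (Int × Int)) : List Int :=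
  let M : Int := 10 ^ 9 + 7
  let n : Int := nums.length
  (queries.foldl (fun (st : PySem.Dict (Int × Int) Int × List Int) q =>
      let sums := if (st.1.get? q).isNone
        then st.1.insert q (PySem.Int.mod (solveWhile nums n q.2 (nums.length + 1) q.1 0) M)
        else st.1
      (sums, st.2 ++ [(sums.get? q).getD 0])) (PySem.Dict.mk [], [])).2

-- ===== PORT B =====
-- 't = 0; while (t+1)*(t+1) <= n: t += 1'
def sqrtLoop (n : Int) : Nat → Int → Int
  | 0, t => t
  | fuel+1, t => if (t+1)*(t+1) ≤ n then sqrtLoop n fuel (t+1) else t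

-- the 'for x in range(n-1, -1, -1): row[x] = nums[x] + (row[x+y] if x+y<n else 0)'
-- loop: the row is built back-to-front, each new entry reading position y-1 of the
-- already-built suffix (which is exactly row[x+y])
def buildRow (y : Nat) (nums : List Int) : List Int :=
  nums.foldr (fun v acc => (v + acc.getD (y - 1) 0) :: acc) []

def solve_alt (nums : List Int) (queries : List (Int × Int)) : List Int :=
  let M : Int := 10 ^ 9 + 7
  let n : Int := nums.length
  let t : Int := sqrtLoop n (nums.length + 1) 0
  let rows : List (List Int) := (PySem.List.pyRange 1 (t+1) 1).map (fun y => buildRow y.toNat nums)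
  queries.map (fun q =>
    if 1 ≤ q.2 ∧ q.2 ≤ t ∧ 0 ≤ q.1 ∧ q.1 < n then
      PySem.Int.mod ((rows.getD (q.2 - 1).toNat []).getD q.1.toNat 0) M
    else
      PySem.Int.mod ((PySem.List.slice? nums (some q.1) none q.2).getD []).sum M)

-- ===== PRECONDITION & SPEC =====
-- Pre_ excludes queries with xi < 0 (A returns a value by negative-index wraparound, an
-- artefact B does not reproduce) and with yi < 1 (A diverges whenever xi < n, and for
-- xi ≥ n returns 0 where B's slice raises on step 0 or slices backwards).
def Pre_solve (nums : List Int) (queries : List (Int × Int)) : Prop :=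
  ∀ q ∈ queries, 0 ≤ q.1 ∧ 1 ≤ q.2
instance (nums : List Int) (queries : List (Int × Int)) : Decidable (Pre_solve nums queries) := by unfold Pre_solve; infer_instance

def pvWitness_solve : List Int × (List (Int × Int)) := ([1, 2, 3], [(0, 1), (1, 2), (4, 5)])

def Spec_solve (nums : List Int) (queries : List (Int × Int)) (out : List Int) : Prop := out = solve_alt nums queries
instance (nums : List Int) (queries : List (Int × Int)) (out : List Int) : Decidable (Spec_solve nums queries out) := by unfold Spec_solve; infer_instance

-- ===== CLAIM (what is proved, stated in full; the proofs are below) =====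
def Claim_equal_solve : Prop := ∀ (nums : List Int) (queries : List (Int × Int)), Dom_solve nums queries → Pre_solve nums queries → Spec_solve nums queries (solve nums queries)

-- ===== LEMMAS AND PROOFS =====

-- canonical value of one query: nums[x] + nums[x+y] + …, with step y = y1 + 1
def apGo (y1 : Nat) : List Int → Int
  | [] => 0
  | v :: rest => v + apGo y1 (rest.drop y1)
termination_by l => l.length
decreasing_by simp

lemma apGo_drop_lt (nums : List Int) (y1 j : Nat) (hj : j < nums.length) :
    apGo y1 (nums.drop j) = nums[j] + apGo y1 (nums.drop (j + 1 + y1)) := by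
  rw [List.drop_eq_getElem_cons hj, apGo, List.drop_drop]

-- A's while loop computes the canonical value
lemma whileA_eq (nums : List Int) (y : Int) (hy : 1 ≤ y) :
    ∀ (fuel : Nat) (j total : Int), 0 ≤ j → ((nums.length : Int) - j).toNat < fuel →
      solveWhile nums nums.length y fuel j total = total + apGo (y.toNat - 1) (nums.drop j.toNat) := by
  intro fuel
  induction fuel with
  | zero => intro j total hj hf; omega
  | succ f ih =>
    intro j total hj hf
    rw [solveWhile]
    by_cases hlt : j < (nums.length : Int)
    · rw [if_pos hlt]
      rw [ih (j + y) _ (by omega) (by omega)]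
      rw [PySem.List.pyGetD_eq_getElem nums 0 hj (by exact_mod_cast hlt)]
      have hjn : j.toNat < nums.length := by omega
      rw [apGo_drop_lt nums _ j.toNat hjn]
      have hidx : (j + y).toNat = j.toNat + 1 + (y.toNat - 1) := by omega
      rw [hidx]
      ring
    · rw [if_neg hlt]
      rw [List.drop_eq_nil_of_le (by omega)]
      simp [apGo]

lemma length_buildRow (y : Nat) (nums : List Int) : (buildRow y nums).length = nums.length := by
  induction nums with
  | nil => rfl
  | cons v rest ih => simp [buildRow, List.foldr] at ih ⊢; exact ih

-- B's suffix-DP row holds the canonical value at every in-range position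
lemma buildRow_getD (y : Nat) :
    ∀ (nums : List Int) (x : Nat), x < nums.length →
      (buildRow y nums).getD x 0 = apGo (y - 1) (nums.drop x) := by
  intro nums
  induction nums with
  | nil => intro x hx; simp at hx
  | cons v rest ih =>
    intro x hx
    match x with
    | 0 =>
      have hrow : buildRow y (v :: rest) = (v + (buildRow y rest).getD (y - 1) 0) :: buildRow y rest := rfl
      rw [hrow]
      simp only [List.getD_cons_zero, List.drop_zero, apGo]
      congr 1
      by_cases h : y - 1 < rest.length
      · exact ih (y - 1) h
      · rw [List.getD_eq_default, List.drop_eq_nil_of_le (by omega)] <;>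
          simp [apGo, length_buildRow]; omega
    | x + 1 =>
      have hrow : buildRow y (v :: rest) = (v + (buildRow y rest).getD (y - 1) 0) :: buildRow y rest := rfl
      rw [hrow, List.getD_cons_succ, List.drop_succ_cons]
      exact ih x (by simpa using hx)

-- the element list of slice?(x, none, y) summed, by induction on its element count
lemma sliceCore (nums : List Int) (y : Int) (hy : 1 ≤ y) :
    ∀ (c : Nat) (s : Nat),
      ((c = 0 ∧ nums.length ≤ s) ∨ (s < nums.length ∧ (c : Int) = ((nums.length : Int) - s - 1) / y + 1)) →
      ((List.range c).filterMap (fun (k : Nat) => nums[((s : Int) + y * (k : Int)).toNat]?)).sum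
        = apGo (y.toNat - 1) (nums.drop s) := by
  intro c
  induction c with
  | zero =>
    intro s h
    rcases h with ⟨-, hs⟩ | ⟨hs, hc⟩
    · rw [List.drop_eq_nil_of_le hs]; simp [apGo]
    · exfalso
      have : (0:Int) ≤ ((nums.length : Int) - s - 1) / y :=
        Int.ediv_nonneg (by omega) (by omega)
      omega
  | succ c' ih =>
    intro s h
    rcases h with ⟨hc, -⟩ | ⟨hs, hc⟩
    · omega
    have h0 : nums[((s : Int) + y * ((0:Nat) : Int)).toNat]? = some (nums[s]'hs) := by
      simp only [Nat.cast_zero, mul_zero, add_zero]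
      rw [List.getElem?_eq_getElem (by omega)]
      simp
    rw [List.range_succ_eq_map, List.filterMap_cons, h0, List.filterMap_map, List.sum_cons]
    have hrw : List.filterMap ((fun (k : Nat) => nums[((s : Int) + y * (k : Int)).toNat]?) ∘ Nat.succ) (List.range c')
        = List.filterMap (fun (k : Nat) => nums[(((s + y.toNat : Nat) : Int) + y * (k : Int)).toNat]?) (List.range c') := by
      apply List.filterMap_congr
      intro k _
      simp only [Function.comp]
      congr 2
      push_cast
      have hyt : (y.toNat : Int) = y := by omega
      rw [hyt]; ring
    have hside : (c' = 0 ∧ nums.length ≤ s + y.toNat) ∨ (s + y.toNat < nums.length ∧ (c' : Int) = ((nums.length : Int) - (s + y.toNat) - 1) / y + 1) := by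
      by_cases hlen : s + y.toNat < nums.length
      · right
        refine ⟨hlen, ?_⟩
        have key : ((nums.length : Int) - s - 1) / y = ((nums.length : Int) - (s + y.toNat) - 1) / y + 1 := by
          have h2 := Int.add_mul_ediv_right ((nums.length : Int) - ((s : Int) + y.toNat) - 1) 1 (show y ≠ 0 by omega)
          have harg : (nums.length : Int) - s - 1 = (nums.length : Int) - ((s : Int) + y.toNat) - 1 + 1 * y := by
            omega
          rw [harg, h2]
        push_cast at key ⊢
        omega
      · left
        have : ((nums.length : Int) - s - 1) / y = 0 :=
          Int.ediv_eq_zero_of_lt (by omega) (by omega)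
        constructor <;> omega
    rw [hrw, ih (s + y.toNat) hside]
    rw [apGo_drop_lt nums (y.toNat - 1) s hs]
    congr 2
    congr 1
    omega

-- B's large-step branch: the sum of nums[x::y] is the canonical value
lemma slice_sum (nums : List Int) (x y : Int) (hx : 0 ≤ x) (hy : 1 ≤ y) :
    ((PySem.List.slice? nums (some x) none y).getD []).sum
      = apGo (y.toNat - 1) (nums.drop x.toNat) := by
  simp only [PySem.List.slice?, PySem.List.sliceIndices]
  rw [if_neg (by omega : ¬ y = 0)]
  simp only [if_neg (by omega : ¬ y < 0), if_neg (by omega : ¬ x < 0), if_pos (by omega : 0 < y)]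
  have hcast : min x (nums.length : Int) = (((min x (nums.length : Int)).toNat : Nat) : Int) := by omega
  set s : Nat := (min x (nums.length : Int)).toNat with hs
  have hdrop : nums.drop s = nums.drop x.toNat := by
    by_cases hxl : x ≤ (nums.length : Int)
    · congr 1; omega
    · rw [List.drop_eq_nil_of_le (by omega), List.drop_eq_nil_of_le (by omega)]
  rw [hcast, Option.getD_some]
  by_cases hsl : s < nums.length
  · rw [if_pos (by exact_mod_cast hsl)]
    rw [sliceCore nums y hy _ s ?_, hdrop]
    right
    refine ⟨hsl, ?_⟩
    have h2 := Int.add_mul_ediv_right ((nums.length : Int) - s - 1) 1 (show y ≠ 0 by omega)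
    have harg : (nums.length : Int) - s + y - 1 = (nums.length : Int) - s - 1 + 1 * y := by ring
    rw [harg, h2]
    have hnn : (0:Int) ≤ ((nums.length : Int) - s - 1) / y := Int.ediv_nonneg (by omega) (by omega)
    omega
  · rw [if_neg (by omega : ¬ ((s:Nat):Int) < (nums.length:Int))]
    rw [sliceCore nums y hy 0 s (Or.inl ⟨rfl, by omega⟩), hdrop]

-- A's memo dict only ever stores f q, so the folded loop appends f q for every query
lemma foldl_memo (f : (Int × Int) → Int) :
    ∀ (qs : List (Int × Int)) (d : PySem.Dict (Int × Int) Int) (acc : List Int),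
      (∀ k v, d.get? k = some v → v = f k) →
      ((qs.foldl (fun (st : PySem.Dict (Int × Int) Int × List Int) q =>
          let sums := if (st.1.get? q).isNone then st.1.insert q (f q) else st.1
          (sums, st.2 ++ [(sums.get? q).getD 0])) (d, acc)).2 = acc ++ qs.map f) := by
  intro qs
  induction qs with
  | nil => intro d acc hinv; simp
  | cons q qs ih =>
    intro d acc hinv
    rw [List.foldl_cons]
    by_cases hnone : (d.get? q).isNone
    · simp only [hnone, if_pos, List.map_cons]
      rw [ih (d.insert q (f q)) _ ?_]
      · rw [PySem.Dict.get?_insert_self, Option.getD_some]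
        simp
      · intro k v hk
        by_cases hkq : k = q
        · subst hkq
          rw [PySem.Dict.get?_insert_self] at hk
          exact (Option.some_inj.mp hk).symm
        · rw [PySem.Dict.get?_insert_of_ne d (f q) hkq] at hk
          exact hinv k v hk
    · simp only [hnone, if_neg, Bool.false_eq_true, not_false_iff]
      obtain ⟨v, hv⟩ : ∃ v, d.get? q = some v := by
        cases h : d.get? q with
        | none => rw [h] at hnone; simp at hnone
        | some v => exact ⟨v, rfl⟩
      rw [ih d _ hinv]
      rw [hv, Option.getD_some, hinv q v hv]
      simp

lemma solve_eq_map (nums : List Int) (queries : List (Int × Int)) :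
    solve nums queries = queries.map (fun q =>
      PySem.Int.mod (solveWhile nums nums.length q.2 (nums.length + 1) q.1 0) (10 ^ 9 + 7)) := by
  have h : solve nums queries
      = ((queries.foldl (fun (st : PySem.Dict (Int × Int) Int × List Int) q =>
          let sums := if (st.1.get? q).isNone
            then st.1.insert q ((fun q : Int × Int =>
              PySem.Int.mod (solveWhile nums nums.length q.2 (nums.length + 1) q.1 0) (10 ^ 9 + 7)) q)
            else st.1
          (sums, st.2 ++ [(sums.get? q).getD 0])) (PySem.Dict.mk [], [])).2) := rfl
  rw [h, foldl_memo _ queries (PySem.Dict.mk []) [] ?_]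
  · simp
  · intro k v hk
    simp [PySem.Dict.get?] at hk

-- ===== VERDICT (by name: the statement is the Claim_ definition above) =====
theorem solve_spec : Claim_equal_solve := by
  intro nums queries _ hpre
  unfold Spec_solve
  rw [solve_eq_map]
  unfold solve_alt
  simp only []
  refine List.map_congr_left ?_
  intro q hq
  obtain ⟨hx, hy⟩ := hpre q hq
  rw [whileA_eq nums q.2 hy (nums.length + 1) q.1 0 hx (by omega), zero_add]
  split_ifs with hcond
  · obtain ⟨hy1, hyt, hx0, hxn⟩ := hcond
    rw [PySem.List.pyRange_one, List.map_map]
    rw [PySem.List.getD_map_range _ _ (q.2 - 1).toNat []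
      (by omega : (q.2 - 1).toNat < ((sqrtLoop (nums.length : Int) (nums.length + 1) 0 + 1) - 1).toNat)]
    simp only [Function.comp]
    have hyy : ((1 : Int) + ((q.2 - 1).toNat : Int)).toNat = q.2.toNat := by omega
    rw [hyy]
    rw [buildRow_getD q.2.toNat nums q.1.toNat (by omega)]
  · rw [slice_sum nums q.1 q.2 hx hy]
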